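-- pv_equiv track=rewrite | github.com/pypi-data/pypi-mirror-400 | packages/selfies-tokenizer/selfies_tokenizer-0.1.4-py3-none-any.whl/selfies_tokenizer/tokenizer.py | _tokenize_manual
-- ===== SOURCE A (Python) =====
-- from typing import List, Union, Dict, Optional
--
-- def _tokenize_manual(selfies_string: str) -> List[str]:
--     """
--     Tokenize using manual string parsing.
--     Fastest for simple cases, no regex overhead.
--     """
--     tokens = []
--     current_token = []
--     in_bracket = False
--
--     for char in selfies_string:
--         if char == '[':
--             in_bracket = True
--             current_token = ['[']
--         elif char == ']':
--             if in_bracket: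
--                 current_token.append(']')
--                 tokens.append(''.join(current_token))
--                 current_token = []
--                 in_bracket = False
--         elif in_bracket:
--             current_token.append(char)
--
--     return tokens
-- ===== SOURCE B (Python) =====
-- import re
--
-- _TOKEN_RE = re.compile(r'\[[^\[\]]*\]')
--
-- def _tokenize_manual(selfies_string):
--     return _TOKEN_RE.findall(selfies_string)
-- ===== Notes on version B (the rewrite author's own statement) =====
-- stated objective: idiomatic
-- what changed: Replaced the hand-written bracket state machine with a single regex findall of \[[^\[\]]*\], whose non-overlapping left-to-right matching reproduces the reset-on-open-bracket and emit-on-close-bracket behaviour.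
import Mathlib
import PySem

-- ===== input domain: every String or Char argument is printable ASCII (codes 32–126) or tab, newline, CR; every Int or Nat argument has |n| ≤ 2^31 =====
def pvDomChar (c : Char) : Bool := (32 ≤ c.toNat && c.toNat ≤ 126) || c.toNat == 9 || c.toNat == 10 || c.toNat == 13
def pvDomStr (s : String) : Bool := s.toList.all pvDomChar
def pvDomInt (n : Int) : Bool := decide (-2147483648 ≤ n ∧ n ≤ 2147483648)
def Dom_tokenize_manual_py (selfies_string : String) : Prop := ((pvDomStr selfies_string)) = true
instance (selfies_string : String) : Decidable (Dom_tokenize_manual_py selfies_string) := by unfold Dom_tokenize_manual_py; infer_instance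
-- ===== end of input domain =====

-- B replaces A's manual character state machine with one regex pass:
-- re.findall(r'\[[^\[\]]*\]') — same return value, more idiomatic.

-- ===== PORT A =====
-- state = (tokens, current_token, in_bracket); one step of A's for-loop body
def tokStepA (st : List String × List Char × Bool) (c : Char) : List String × List Char × Bool :=
  if c = '[' then (st.1, ['['], true)
  else if c = ']' then
    if st.2.2 then (st.1 ++ [String.mk (st.2.1 ++ [']'])], [], false) else st
  else if st.2.2 then (st.1, st.2.1 ++ [c], true) else st

def tokenize_manual_py (selfies_string : String) : List String :=
  (selfies_string.toList.foldl tokStepA ([], [], false)).1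

-- ===== PORT B =====
-- Hand-port of re.findall with the fixed pattern \[[^\[\]]*\]: exact for this
-- pattern — scanOut looks for the next '[' (match attempts at other characters
-- fail immediately); scanIn consumes [^\[\]]* then ']' (a '[' restarts the
-- attempt there, a ']' completes a non-overlapping match and scanning resumes
-- after it).
mutual
def tokScanOut : List Char → List String
  | [] => []
  | c :: rest => if c = '[' then tokScanIn rest ['['] else tokScanOut rest
def tokScanIn : List Char → List Char → List String
  | [], _ => []
  | c :: rest, cur =>
    if c = '[' then tokScanIn rest ['[']
    else if c = ']' then String.mk (cur ++ [']']) :: tokScanOut rest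
    else tokScanIn rest (cur ++ [c])
end

def tokenize_manual_py_alt (selfies_string : String) : List String :=
  tokScanOut selfies_string.toList

-- ===== PRECONDITION & SPEC =====
def Spec_tokenize_manual_py (selfies_string : String) (out : List String) : Prop := out = tokenize_manual_py_alt selfies_string
instance (selfies_string : String) (out : List String) : Decidable (Spec_tokenize_manual_py selfies_string out) := by unfold Spec_tokenize_manual_py; infer_instance

-- ===== CLAIM (what is proved, stated in full; the proofs are below) =====
def Claim_equal_tokenize_manual_py : Prop := ∀ (selfies_string : String), Dom_tokenize_manual_py selfies_string → Spec_tokenize_manual_py selfies_string (tokenize_manual_py selfies_string)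

-- ===== LEMMAS AND PROOFS =====

-- Invariant of A's fold, proved simultaneously for both machine states.
lemma tok_fold_scan (cs : List Char) :
    (∀ (toks : List String) (cur : List Char),
      (cs.foldl tokStepA (toks, cur, false)).1 = toks ++ tokScanOut cs) ∧
    (∀ (toks : List String) (cur : List Char),
      (cs.foldl tokStepA (toks, cur, true)).1 = toks ++ tokScanIn cs cur) := by
  induction cs with
  | nil => simp [tokScanOut, tokScanIn]
  | cons c rest ih =>
    constructor <;> intro toks cur <;>
      by_cases h1 : c = '[' <;> by_cases h2 : c = ']' <;>
      simp [List.foldl, tokStepA, tokScanOut, tokScanIn, h1, h2, ih.1, ih.2]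

-- ===== VERDICT (by name: the statement is the Claim_ definition above) =====
theorem tokenize_manual_py_spec : Claim_equal_tokenize_manual_py := by
  intro s _
  unfold Spec_tokenize_manual_py tokenize_manual_py tokenize_manual_py_alt
  simpa using (tok_fold_scan s.toList).1 [] []
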